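-- pv_equiv track=rewrite | github.com/sonusario/ARCHIVE | The-Archive/nBit_CycleTester.py | shortCycle3
-- ===== SOURCE A (Python) =====
-- def shortCycle3(arr):
--     d = len(arr) - 1
--
--     while d >= 0:
--         if arr[d] == 0:
--             arr[d] = 1
--             return list(arr)
--         else:
--             arr[d] = 0
--         d -= 1
--
--     return list(arr)
-- ===== SOURCE B (Python) =====
-- def shortCycle3(arr):
--     # locate-then-write: find rightmost 0, set it to 1, zero everything right of it
--     idx = None
--     for i in range(len(arr) - 1, -1, -1):
--         if arr[i] == 0:
--             idx = i
--             break
--     if idx is None: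
--         for i in range(len(arr)):
--             arr[i] = 0
--         return list(arr)
--     arr[idx] = 1
--     for i in range(idx + 1, len(arr)):
--         arr[i] = 0
--     return list(arr)
-- ===== Notes on version B (the rewrite author's own statement) =====
-- stated objective: alternative
-- what changed: Replaces A's single interleaved flip-as-you-scan pass with a two-phase locate-then-write: first find the rightmost element equal to 0 without modifying anything, then set it to 1 and zero the suffix to its right (or zero everything if no 0 exists).
import Mathlib
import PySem

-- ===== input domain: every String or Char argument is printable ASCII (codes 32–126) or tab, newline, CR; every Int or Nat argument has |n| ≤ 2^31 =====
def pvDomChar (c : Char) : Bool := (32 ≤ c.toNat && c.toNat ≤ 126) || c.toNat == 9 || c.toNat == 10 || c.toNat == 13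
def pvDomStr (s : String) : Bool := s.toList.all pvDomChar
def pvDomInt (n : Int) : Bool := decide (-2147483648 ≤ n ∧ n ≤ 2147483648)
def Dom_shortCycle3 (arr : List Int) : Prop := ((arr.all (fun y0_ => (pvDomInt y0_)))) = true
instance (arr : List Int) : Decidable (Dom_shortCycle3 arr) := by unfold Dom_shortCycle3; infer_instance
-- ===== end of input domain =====

-- B replaces A's interleaved flip-as-you-scan pass with a locate-then-write two-phase pass
-- (find rightmost 0, then write); same O(n) cost. Both Pythons mutate arr identically in place;
-- the theorem is about the returned list.

-- ===== PORT A =====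
-- A's while loop, d counting down; fuel n means d = n-1; the list is mutated as A does.
def shortCycle3Loop : List Int → Nat → List Int
  | arr, 0 => arr
  | arr, n + 1 =>
    if arr.getD n 0 = 0 then (arr.set n 1)
    else shortCycle3Loop (arr.set n 0) n

def shortCycle3 (arr : List Int) : List Int := shortCycle3Loop arr arr.length

-- ===== PORT B =====
-- phase 1: scan from the end for the first index holding 0 (Source B's break loop)
def findZeroFromEnd (arr : List Int) : Nat → Option Nat
  | 0 => none
  | n + 1 => if arr.getD n 0 = 0 then some n else findZeroFromEnd arr n

def shortCycle3_alt (arr : List Int) : List Int :=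
  match findZeroFromEnd arr arr.length with
  | none => (List.range arr.length).foldl (fun a i => a.set i 0) arr
  | some idx =>
      (List.range' (idx + 1) (arr.length - (idx + 1))).foldl (fun a i => a.set i 0) (arr.set idx 1)

-- ===== PRECONDITION & SPEC =====
def Spec_shortCycle3 (arr : List Int) (out : List Int) : Prop := out = shortCycle3_alt arr
instance (arr : List Int) (out : List Int) : Decidable (Spec_shortCycle3 arr out) := by unfold Spec_shortCycle3; infer_instance

-- ===== CLAIM (what is proved, stated in full; the proofs are below) =====
def Claim_equal_shortCycle3 : Prop := ∀ (arr : List Int), Dom_shortCycle3 arr → Spec_shortCycle3 arr (shortCycle3 arr)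

-- ===== LEMMAS AND PROOFS =====

-- B's result expressed for a scan bounded by n (proof-side generalization)
def altOn (arr : List Int) (n : Nat) : List Int :=
  match findZeroFromEnd arr n with
  | none => (List.range' 0 n).foldl (fun a i => a.set i 0) arr
  | some idx => (List.range' (idx + 1) (n - (idx + 1))).foldl (fun a i => a.set i 0) (arr.set idx 1)

theorem findZero_lt (arr : List Int) (n idx : Nat) (h : findZeroFromEnd arr n = some idx) : idx < n := by
  induction n with
  | zero => simp [findZeroFromEnd] at h
  | succ n ih =>
    simp only [findZeroFromEnd] at h
    split at h
    · injection h with h; omega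
    · exact Nat.lt_succ_of_lt (ih h)

theorem findZero_set_ge (arr : List Int) (n m : Nat) (v : Int) (hmn : n ≤ m) :
    findZeroFromEnd (arr.set m v) n = findZeroFromEnd arr n := by
  induction n with
  | zero => rfl
  | succ n ih =>
    have hne : m ≠ n := by omega
    simp only [findZeroFromEnd, List.getD_eq_getElem?_getD, List.getElem?_set_ne hne,
      ih (by omega)]

theorem foldl_set_comm (l : List Nat) (a : List Int) (m : Nat) (v : Int)
    (h : ∀ i ∈ l, i ≠ m) :
    l.foldl (fun a i => a.set i 0) (a.set m v) = (l.foldl (fun a i => a.set i 0) a).set m v := by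
  induction l generalizing a with
  | nil => rfl
  | cons x xs ih =>
    simp only [List.foldl_cons]
    rw [List.set_comm v 0 (fun e => h x (List.mem_cons_self) e.symm),
      ih _ (fun i hi => h i (List.mem_cons_of_mem _ hi))]

theorem loop_eq_altOn (n : Nat) (arr : List Int) : shortCycle3Loop arr n = altOn arr n := by
  induction n generalizing arr with
  | zero => simp [shortCycle3Loop, altOn, findZeroFromEnd]
  | succ n ih =>
    by_cases h0 : arr.getD n 0 = 0
    · simp only [shortCycle3Loop, altOn, findZeroFromEnd, h0, if_pos]
      simp
    · have hA : shortCycle3Loop arr (n + 1) = shortCycle3Loop (arr.set n 0) n := by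
        simp only [shortCycle3Loop, h0, if_false]
      rw [hA, ih]
      unfold altOn
      rw [findZero_set_ge arr n n 0 (le_refl n)]
      have hfz : findZeroFromEnd arr (n + 1) = findZeroFromEnd arr n := by
        simp only [findZeroFromEnd, h0, if_false]
      rw [hfz]
      cases hfind : findZeroFromEnd arr n with
      | none =>
        simp only
        rw [List.range'_concat, List.foldl_append, List.foldl_cons, List.foldl_nil,
          foldl_set_comm _ _ _ _ (by intro i hi; simp [List.mem_range'_1] at hi; omega)]
        simp
      | some idx =>
        have hlt : idx < n := findZero_lt arr n idx hfind
        simp only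
        have hne : n ≠ idx := by omega
        rw [List.set_comm 0 1 hne]
        have hlen : n + 1 - (idx + 1) = (n - (idx + 1)) + 1 := by omega
        rw [hlen, List.range'_concat, List.foldl_append, List.foldl_cons, List.foldl_nil,
          foldl_set_comm _ _ _ _ (by intro i hi; simp [List.mem_range'_1] at hi; omega)]
        congr 1
        omega

-- ===== VERDICT (by name: the statement is the Claim_ definition above) =====
theorem shortCycle3_spec : Claim_equal_shortCycle3 := by
  intro arr _
  unfold Spec_shortCycle3 shortCycle3 shortCycle3_alt
  rw [loop_eq_altOn]
  unfold altOn
  rw [List.range_eq_range']
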